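-- pv_equiv track=rewrite | github.com/ay27/fucking_python_map | fucking_python_map.py | _auto_split
-- ===== SOURCE A (Python) =====
-- import math
--
-- def _auto_split(length, count):
--     if length < count:
--         raise AttributeError('length must >= count')
--     if count <= 0:
--         raise AttributeError('count must > 0')
--     start = []
--     end = []
--     fr = int(math.ceil(length / float(count)))
--     tt = fr * count - length
--     pc = 0
--     for ii in range(count - tt):
--         start.append(pc)
--         pc += fr
--         end.append(pc)
--     fr -= 1
--     for ii in range(tt):
--         start.append(pc)
--         pc += fr
--         end.append(pc)
--     end[-1] = length
--     return start, end
-- ===== SOURCE B (Python) =====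
-- def _auto_split(length, count):
--     if length < count:
--         raise AttributeError('length must >= count')
--     if count <= 0:
--         raise AttributeError('count must > 0')
--     q, r = divmod(length, count)
--     b = [i * q + min(i, r) for i in range(count + 1)]
--     return b[:-1], b[1:]
-- ===== Notes on version B (the rewrite author's own statement) =====
-- stated objective: simpler
-- what changed: Replaced the two sequential accumulator loops (ceil-based chunk size, running position, final end[-1] patch) by a closed-form divmod and a single comprehension of boundary positions b[i]=i*q+min(i,r), returning b[:-1], b[1:].
import Mathlib
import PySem

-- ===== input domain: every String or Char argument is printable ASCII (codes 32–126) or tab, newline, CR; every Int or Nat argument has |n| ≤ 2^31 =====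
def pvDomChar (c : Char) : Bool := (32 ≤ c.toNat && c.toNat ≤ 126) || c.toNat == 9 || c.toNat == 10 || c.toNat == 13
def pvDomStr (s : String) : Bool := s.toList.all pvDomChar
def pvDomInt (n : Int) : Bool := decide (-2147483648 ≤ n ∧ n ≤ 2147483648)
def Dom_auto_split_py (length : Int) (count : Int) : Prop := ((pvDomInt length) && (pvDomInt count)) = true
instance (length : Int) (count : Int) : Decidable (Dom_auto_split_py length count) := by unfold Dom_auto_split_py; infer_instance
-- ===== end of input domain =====

-- B replaces A's two accumulator loops by a closed-form divmod and one comprehension of the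
-- chunk boundary positions (objective: simpler); outside Pre_ both raise the same AttributeErrors.

-- ===== PORT A =====
def auto_split_py (length : Int) (count : Int) : List Int × List Int :=
  if length < count then ([], [])          -- raise AttributeError('length must >= count'): outside Pre_
  else if count ≤ 0 then ([], [])          -- raise AttributeError('count must > 0'): outside Pre_
  else
    -- fr = int(math.ceil(length / float(count))): exact ceiling division here, since on Dom the
    -- operands are ≤ 2^31 < 2^53, so the rounded float quotient never crosses an integer
    let fr := -(PySem.Int.floordiv (-length) count)
    let tt := fr * count - length
    let st1 := (PySem.List.pyRange 0 (count - tt) 1).foldl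
      (fun (st : List Int × List Int × Int) _ => (st.1 ++ [st.2.2], st.2.1 ++ [st.2.2 + fr], st.2.2 + fr))
      ([], [], 0)
    let fr1 := fr - 1
    let st2 := (PySem.List.pyRange 0 tt 1).foldl
      (fun (st : List Int × List Int × Int) _ => (st.1 ++ [st.2.2], st.2.1 ++ [st.2.2 + fr1], st.2.2 + fr1))
      st1
    -- end[-1] = length (end is nonempty here since count ≥ 1)
    (st2.1, st2.2.1.dropLast ++ [length])

-- ===== PORT B =====
def auto_split_py_alt (length : Int) (count : Int) : List Int × List Int :=
  if length < count then ([], [])          -- raise AttributeError('length must >= count'): outside Pre_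
  else if count ≤ 0 then ([], [])          -- raise AttributeError('count must > 0'): outside Pre_
  else
    let q := PySem.Int.floordiv length count
    let r := PySem.Int.mod length count
    let b := (PySem.List.pyRange 0 (count + 1) 1).map (fun i => i * q + min i r)
    (PySem.List.slice b none (some (-1)), PySem.List.slice b (some 1) none)

-- ===== PRECONDITION & SPEC =====
-- Pre_ excludes exactly the inputs on which A (and B alike) raises AttributeError
-- (length < count or count <= 0); on them neither program returns a value.
def Pre_auto_split_py (length : Int) (count : Int) : Prop := 0 < count ∧ count ≤ length
instance (length : Int) (count : Int) : Decidable (Pre_auto_split_py length count) := by unfold Pre_auto_split_py; infer_instance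
def pvWitness_auto_split_py : Int × Int := (10, 3)

def Spec_auto_split_py (length : Int) (count : Int) (out : List Int × List Int) : Prop := out = auto_split_py_alt length count
instance (length : Int) (count : Int) (out : List Int × List Int) : Decidable (Spec_auto_split_py length count out) := by unfold Spec_auto_split_py; infer_instance

-- ===== CLAIM (what is proved, stated in full; the proofs are below) =====
def Claim_equal_auto_split_py : Prop := ∀ (length : Int) (count : Int), Dom_auto_split_py length count → Pre_auto_split_py length count → Spec_auto_split_py length count (auto_split_py length count)

-- ===== LEMMAS AND PROOFS =====

-- A's append loop in closed form (the loop body ignores the loop variable, so only l.length matters).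
theorem loopA_spec (step : Int) (l : List Int) (s e : List Int) (pc : Int) :
    l.foldl (fun (st : List Int × List Int × Int) _ => (st.1 ++ [st.2.2], st.2.1 ++ [st.2.2 + step], st.2.2 + step)) (s, e, pc)
      = (s ++ (List.range l.length).map (fun (j : Nat) => pc + (j : Int) * step),
         e ++ (List.range l.length).map (fun (j : Nat) => pc + ((j : Int) + 1) * step),
         pc + (l.length : Int) * step) := by
  induction l generalizing s e pc with
  | nil => simp
  | cons x t ih =>
    simp only [List.foldl_cons, List.length_cons]
    rw [ih, List.range_succ_eq_map, List.map_cons, List.map_cons, List.map_map, List.map_map,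
      List.append_assoc, List.append_assoc, List.singleton_append, List.singleton_append]
    have h1 : List.map ((fun (j : Nat) => pc + (j : Int) * step) ∘ Nat.succ) (List.range t.length)
        = List.map (fun (j : Nat) => pc + step + (j : Int) * step) (List.range t.length) :=
      List.map_congr_left fun j hj => by simp [Nat.succ_eq_add_one]; ring
    have h2 : List.map ((fun (j : Nat) => pc + ((j : Int) + 1) * step) ∘ Nat.succ) (List.range t.length)
        = List.map (fun (j : Nat) => pc + step + ((j : Int) + 1) * step) (List.range t.length) :=
      List.map_congr_left fun j hj => by simp [Nat.succ_eq_add_one]; ring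
    rw [h1, h2]
    push_cast
    refine Prod.ext ?_ (Prod.ext ?_ (by dsimp; ring))
    · dsimp; norm_num
    · dsimp; norm_num

-- The heart of the equivalence: on 0 < count ≤ length the two ports agree.
theorem auto_split_main (length count : Int) (hc : 0 < count) (hl : count ≤ length) :
    auto_split_py length count = auto_split_py_alt length count := by
  have hnlt : ¬ length < count := not_lt.mpr hl
  have hnle : ¬ count ≤ 0 := not_le.mpr hc
  unfold auto_split_py auto_split_py_alt
  rw [if_neg hnlt, if_neg hnle, if_neg hnlt, if_neg hnle]
  dsimp only
  have hqr : PySem.Int.floordiv length count * count + PySem.Int.mod length count = length :=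
    PySem.Int.floordiv_mul_add_mod length count
  have hr0 : 0 ≤ PySem.Int.mod length count := PySem.Int.mod_nonneg length hc
  have hrc : PySem.Int.mod length count < count := PySem.Int.mod_lt length hc
  set r := PySem.Int.mod length count with hrdef
  set q := PySem.Int.floordiv length count with hqdef
  have hm : ((count.toNat : Int)) = count := Int.toNat_of_nonneg hc.le
  set m := count.toNat with hmdef
  have hmpos : 0 < m := by omega
  -- B side common rewriting
  rw [PySem.List.slice_to_neg_one, PySem.List.slice_from_one, PySem.List.pyRange_one 0 (count + 1),
    List.map_map]
  have hcnt : ((count + 1) - 0).toNat = m + 1 := by omega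
  rw [hcnt]
  by_cases hr : r = 0
  · -- length divisible by count: fr = q, tt = 0, the second loop is empty
    have hfr : -(PySem.Int.floordiv (-length) count) = q :=
      (PySem.Int.neg_floordiv_neg_eq_iff_of_pos hc).mpr (by constructor <;> nlinarith)
    rw [hfr]
    have htt : q * count - length = 0 := by linarith
    rw [htt, sub_zero, PySem.List.pyRange_one_eq_nil (le_refl 0), List.foldl_nil, loopA_spec,
      PySem.List.length_pyRange_one]
    have hc0 : (count - 0).toNat = m := by omega
    rw [hc0, hr]
    refine Prod.ext ?_ ?_
    · simp only [List.nil_append]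
      conv_rhs => rw [List.range_succ]
      rw [List.map_append]
      simp only [List.map_cons, List.map_nil]
      rw [List.dropLast_concat]
      exact List.map_congr_left fun j hj => by
        simp only [Function.comp_apply]
        rw [min_eq_right (by positivity : (0:ℤ) ≤ 0 + (j:ℤ))]
        ring
    · obtain ⟨m', hm'⟩ : ∃ m', m = m' + 1 := ⟨m - 1, by omega⟩
      rw [hm'] at hm ⊢
      simp only [List.nil_append]
      conv_rhs => rw [List.range_succ_eq_map, List.map_cons, List.tail_cons, List.map_map,
        List.range_succ, List.map_append]
      conv_lhs => rw [List.range_succ, List.map_append, List.map_cons, List.map_nil,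
        List.dropLast_concat]
      congr 1
      · exact List.map_congr_left fun j hj => by
          simp only [Function.comp_apply, Nat.succ_eq_add_one]
          rw [min_eq_right (by positivity : (0:ℤ) ≤ 0 + ((j + 1 : Nat) : ℤ))]
          push_cast
          ring
      · simp only [List.map_cons, List.map_nil, Function.comp_apply, Nat.succ_eq_add_one,
          List.cons.injEq, and_true]
        rw [min_eq_right (by positivity : (0:ℤ) ≤ 0 + (((m' + 1 : Nat) : ℤ)))]
        rw [← hm] at hqr
        push_cast at hqr ⊢
        linarith
  · -- length not divisible: fr = q + 1, tt = count - r; the first r chunks have size q + 1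
    have hrpos : 0 < r := hr0.lt_of_ne (Ne.symm hr)
    have hfr : -(PySem.Int.floordiv (-length) count) = q + 1 :=
      (PySem.Int.neg_floordiv_neg_eq_iff_of_pos hc).mpr
        ⟨by nlinarith [hqr, hrpos], by nlinarith [hqr, hrc]⟩
    rw [hfr]
    have htt : (q + 1) * count - length = count - r := by nlinarith
    rw [htt]
    have hct : count - (count - r) = r := by ring
    rw [hct, loopA_spec, PySem.List.length_pyRange_one, loopA_spec, PySem.List.length_pyRange_one]
    have hr1 : (r - 0).toNat = r.toNat := by omega
    have hr2 : ((count - r) - 0).toNat = m - r.toNat := by omega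
    rw [hr1, hr2]
    dsimp only
    have hrn : ((r.toNat : Int)) = r := Int.toNat_of_nonneg hr0
    have hsplit : m = r.toNat + (m - r.toNat) := by omega
    obtain ⟨n2', h2⟩ : ∃ n2', m - r.toNat = n2' + 1 := ⟨m - r.toNat - 1, by omega⟩
    refine Prod.ext ?_ ?_
    · simp only [List.nil_append]
      conv_rhs => rw [List.range_succ, List.map_append, List.map_cons, List.map_nil,
        List.dropLast_concat, hsplit, List.range_add, List.map_append, List.map_map]
      congr 1
      · exact List.map_congr_left fun j hj => by
          simp only [Function.comp_apply]
          have hjr : (j : ℤ) < r := by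
            rw [List.mem_range] at hj; omega
          rw [min_eq_left (by omega : (0:ℤ) + (j:ℤ) ≤ r)]
          ring
      · exact List.map_congr_left fun j hj => by
          simp only [Function.comp_apply]
          rw [min_eq_right (by omega : r ≤ 0 + ((r.toNat + j : Nat) : ℤ))]
          push_cast
          rw [hrn]
          ring
    · simp only [List.nil_append]
      conv_rhs => rw [List.range_succ_eq_map, List.map_cons, List.tail_cons, List.map_map,
        hsplit, List.range_add, List.map_append, List.map_map, h2, List.range_succ,
        List.map_append, List.map_cons, List.map_nil]
      conv_lhs => rw [h2, List.range_succ, List.map_append, List.map_cons, List.map_nil,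
        ← List.append_assoc, List.dropLast_concat]
      simp only [List.append_assoc]
      congr 1
      · exact List.map_congr_left fun j hj => by
          simp only [Function.comp_apply, Nat.succ_eq_add_one]
          have hjr : (j : ℤ) + 1 ≤ r := by
            rw [List.mem_range] at hj; omega
          rw [min_eq_left (by omega : (0:ℤ) + ((j + 1 : Nat) : ℤ) ≤ r)]
          push_cast
          ring
      congr 1
      · exact List.map_congr_left fun j hj => by
          simp only [Function.comp_apply, Nat.succ_eq_add_one]
          rw [min_eq_right (by omega : r ≤ 0 + ((r.toNat + j + 1 : Nat) : ℤ))]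
          push_cast
          rw [hrn]
          ring
      · simp only [Function.comp_apply, Nat.succ_eq_add_one, List.cons.injEq, and_true]
        rw [min_eq_right (by omega : r ≤ 0 + ((r.toNat + n2' + 1 : Nat) : ℤ))]
        have hcc : (0:ℤ) + ((r.toNat + n2' + 1 : Nat) : ℤ) = count := by omega
        rw [hcc]
        linarith

-- ===== VERDICT (by name: the statement is the Claim_ definition above) =====
theorem auto_split_py_spec : Claim_equal_auto_split_py := by
  intro length count _ hpre
  unfold Spec_auto_split_py
  exact auto_split_main length count hpre.1 hpre.2
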